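-- pv_equiv track=rewrite | github.com/SeanFromOhio/Tkinter-Sorting-Algo_Visualizer | app.py | qs_get_color_array
-- ===== SOURCE A (Python) =====
-- def qs_get_color_array(data_length, low, high, smaller_val, comparison_val=None):
--     color_array = ["red" for _i in range(0, data_length)]  # Base coloring is all red
--     for i in range(0, data_length):
--         if i == low:
--             color_array[i] = "green"
--         elif i == high:
--             color_array[i] = "green"
--         if i == smaller_val:
--             color_array[i] = "purple"
--         if i == comparison_val:
--             color_array[i] = "blue"
--
--     return color_array
-- ===== SOURCE B (Python) =====
-- def qs_get_color_array(data_length, low, high, smaller_val, comparison_val=None):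
--     # Targeted guarded writes instead of scanning every index; later writes win.
--     colors = ["red"] * data_length
--     for idx, color in ((low, "green"), (high, "green"),
--                        (smaller_val, "purple"), (comparison_val, "blue")):
--         if idx is not None and 0 <= idx < data_length:
--             colors[idx] = color
--     return colors
-- ===== Notes on version B (the rewrite author's own statement) =====
-- stated objective: simpler
-- what changed: Replaced A's scan over every index (testing each i against low/high/smaller/comparison) by four targeted bounds-guarded writes into the all-red base list, applied in last-wins precedence order.
import Mathlib
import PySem

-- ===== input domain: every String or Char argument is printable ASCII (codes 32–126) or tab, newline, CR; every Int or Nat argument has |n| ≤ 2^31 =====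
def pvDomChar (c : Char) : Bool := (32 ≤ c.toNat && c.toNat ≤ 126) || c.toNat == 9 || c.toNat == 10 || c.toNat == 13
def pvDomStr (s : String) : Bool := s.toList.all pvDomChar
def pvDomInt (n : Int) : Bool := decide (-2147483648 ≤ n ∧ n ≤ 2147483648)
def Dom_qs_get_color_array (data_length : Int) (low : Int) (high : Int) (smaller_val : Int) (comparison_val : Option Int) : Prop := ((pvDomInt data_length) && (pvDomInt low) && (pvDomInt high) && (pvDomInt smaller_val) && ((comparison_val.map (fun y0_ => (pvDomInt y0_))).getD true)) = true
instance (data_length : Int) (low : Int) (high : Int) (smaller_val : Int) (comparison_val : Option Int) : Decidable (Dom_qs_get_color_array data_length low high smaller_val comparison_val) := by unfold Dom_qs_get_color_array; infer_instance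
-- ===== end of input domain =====

-- B replaces A's full scan over all indices by four targeted, bounds-guarded writes (objective: simpler).

-- ===== PORT A =====
-- the body of A's for-loop over i (the three if-blocks, in source order)
def pvStepA (low : Int) (high : Int) (smaller_val : Int) (comparison_val : Option Int)
    (a : List String) (i : Int) : List String :=
  let a1 := if i = low then a.set i.toNat "green"
            else if i = high then a.set i.toNat "green"
            else a
  let a2 := if i = smaller_val then a1.set i.toNat "purple" else a1
  if some i = comparison_val then a2.set i.toNat "blue" else a2

def qs_get_color_array (data_length : Int) (low : Int) (high : Int) (smaller_val : Int) (comparison_val : Option Int) : List String :=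
  let color_array := (PySem.List.pyRange 0 data_length 1).map (fun _ => "red")
  (PySem.List.pyRange 0 data_length 1).foldl
    (pvStepA low high smaller_val comparison_val) color_array

-- ===== PORT B =====
-- colors[idx] = color, guarded by 0 <= idx < data_length (None never writes)
def pvWrite (data_length : Int) (colors : List String) (idx : Option Int) (color : String) : List String :=
  match idx with
  | some v => if 0 ≤ v ∧ v < data_length then colors.set v.toNat color else colors
  | none => colors

def qs_get_color_array_alt (data_length : Int) (low : Int) (high : Int) (smaller_val : Int) (comparison_val : Option Int) : List String :=
  let colors := List.replicate data_length.toNat "red"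
  [(some low, "green"), (some high, "green"), (some smaller_val, "purple"), (comparison_val, "blue")].foldl
    (fun a p => pvWrite data_length a p.1 p.2) colors

-- ===== PRECONDITION & SPEC =====
def Spec_qs_get_color_array (data_length : Int) (low : Int) (high : Int) (smaller_val : Int) (comparison_val : Option Int) (out : List String) : Prop := out = qs_get_color_array_alt data_length low high smaller_val comparison_val
instance (data_length : Int) (low : Int) (high : Int) (smaller_val : Int) (comparison_val : Option Int) (out : List String) : Decidable (Spec_qs_get_color_array data_length low high smaller_val comparison_val out) := by unfold Spec_qs_get_color_array; infer_instance

-- ===== CLAIM (what is proved, stated in full; the proofs are below) =====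
def Claim_equal_qs_get_color_array : Prop := ∀ (data_length : Int) (low : Int) (high : Int) (smaller_val : Int) (comparison_val : Option Int), Dom_qs_get_color_array data_length low high smaller_val comparison_val → Spec_qs_get_color_array data_length low high smaller_val comparison_val (qs_get_color_array data_length low high smaller_val comparison_val)

-- ===== LEMMAS AND PROOFS =====

-- the final colour of cell j (j a valid index): last write wins
def pvColorAt (low : Int) (high : Int) (smaller_val : Int) (comparison_val : Option Int) (j : Nat) : String :=
  if some (j : Int) = comparison_val then "blue"
  else if (j : Int) = smaller_val then "purple"
  else if (j : Int) = low ∨ (j : Int) = high then "green"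
  else "red"

-- one iteration of A's loop, read at its own index m (a red cell before the step)
lemma pvStepA_at (low high smaller_val : Int) (comparison_val : Option Int) (m : Nat) (l : List String)
    (hm : m < l.length) (hred : l[m]? = some "red") :
    (pvStepA low high smaller_val comparison_val l (m : Int))[m]?
      = some (pvColorAt low high smaller_val comparison_val m) := by
  simp only [pvStepA, Int.toNat_natCast, pvColorAt]
  split_ifs <;> simp_all

-- one iteration of A's loop leaves every other index unchanged
lemma pvStepA_ne (low high smaller_val : Int) (comparison_val : Option Int) (m : Nat) (l : List String)
    (i : Nat) (hi : i ≠ m) :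
    (pvStepA low high smaller_val comparison_val l (m : Int))[i]? = l[i]? := by
  simp only [pvStepA, Int.toNat_natCast]
  split_ifs <;> simp [List.getElem?_set_ne (fun h => hi h.symm)]

-- A's loop invariant: after processing indices 0..m-1, cells below m are final, the rest red
lemma pvA_loop (low high smaller_val : Int) (comparison_val : Option Int) (N : Nat) :
    ∀ m : Nat, m ≤ N →
    (PySem.List.pyRange 0 (m : Int) 1).foldl (pvStepA low high smaller_val comparison_val)
        (List.replicate N "red")
      = (List.range N).map (fun j => if j < m then pvColorAt low high smaller_val comparison_val j else "red") := by
  intro m hm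
  induction m with
  | zero =>
    simp [List.map_const']
  | succ m ih =>
    have hm' : m ≤ N := Nat.le_of_succ_le hm
    have hmN : m < N := hm
    have hcast : ((m + 1 : Nat) : Int) = (m : Int) + 1 := by push_cast; ring
    rw [hcast, PySem.List.pyRange_one_succ_right (by positivity), List.foldl_append,
        ih hm', List.foldl_cons, List.foldl_nil]
    apply List.ext_getElem?
    intro i
    by_cases hi : i = m
    · subst hi
      rw [pvStepA_at low high smaller_val comparison_val i _
            (by simpa using hmN)
            (by simp [List.getElem?_map, List.getElem?_range hmN])]
      simp [List.getElem?_map, List.getElem?_range hmN]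
    · rw [pvStepA_ne low high smaller_val comparison_val m _ i hi]
      by_cases hiN : i < N
      · simp only [List.getElem?_map, List.getElem?_range hiN, Option.map_some]
        rw [if_congr (show (i < m + 1 ↔ i < m) from by omega) rfl rfl]
      · have hnone : (List.range N)[i]? = none := List.getElem?_eq_none (by simp; omega)
        simp [List.getElem?_map, hnone]

-- A equals the pointwise description
lemma pvA_eq (data_length low high smaller_val : Int) (comparison_val : Option Int) :
    qs_get_color_array data_length low high smaller_val comparison_val
      = (List.range data_length.toNat).map (pvColorAt low high smaller_val comparison_val) := by
  unfold qs_get_color_array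
  have hr : PySem.List.pyRange 0 data_length 1 = PySem.List.pyRange 0 (data_length.toNat : Int) 1 := by
    by_cases h : 0 ≤ data_length
    · rw [show ((data_length.toNat : Nat) : Int) = data_length from by omega]
    · rw [show data_length.toNat = 0 from by omega]
      rw [PySem.List.pyRange_zero_natCast 0]
      simp [PySem.List.pyRange]
      omega
  rw [hr]
  have hinit : (PySem.List.pyRange 0 (data_length.toNat : Int) 1).map (fun _ => "red")
      = List.replicate data_length.toNat ("red" : String) := by
    rw [PySem.List.pyRange_zero_natCast, List.map_map]
    have hc : ((fun _ => "red") ∘ fun k : Nat => (k : Int)) = fun _ : Nat => ("red" : String) := rfl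
    rw [hc, List.map_const']
    simp
  simp only [hinit]
  rw [pvA_loop low high smaller_val comparison_val data_length.toNat data_length.toNat (le_refl _)]
  apply List.map_congr_left
  intro j hj
  simp only [List.mem_range] at hj
  simp [hj]

-- a guarded write never changes the length
lemma pvWrite_length (n : Int) (l : List String) (o : Option Int) (c : String) :
    (pvWrite n l o c).length = l.length := by
  cases o <;> simp only [pvWrite]
  · split_ifs <;> simp

-- reading one guarded write at a valid index
lemma pvWrite_getElem (n : Int) (l : List String) (v : Int) (c : String) (j : Nat)
    (hjn : (j : Int) < n) (h : j < l.length) (h' : j < (pvWrite n l (some v) c).length) :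
    (pvWrite n l (some v) c)[j]'h' = if v = (j : Int) then c else l[j]'h := by
  simp only [pvWrite]
  by_cases hv : v = (j : Int)
  · rw [if_pos hv]
    have hg : 0 ≤ v ∧ v < n := by omega
    have ht : v.toNat = j := by omega
    simp [hg, ht]
  · rw [if_neg hv]
    split_ifs with hg
    · rw [List.getElem_set_ne (show v.toNat ≠ j from by omega)]
    · rfl

-- B equals the pointwise description
lemma pvB_eq (data_length low high smaller_val : Int) (comparison_val : Option Int) :
    qs_get_color_array_alt data_length low high smaller_val comparison_val
      = (List.range data_length.toNat).map (pvColorAt low high smaller_val comparison_val) := by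
  unfold qs_get_color_array_alt
  simp only [List.foldl_cons, List.foldl_nil]
  apply List.ext_getElem
  · simp [pvWrite_length]
  · intro j hj₁ hj₂
    have hjN : j < data_length.toNat := by simpa using hj₂
    have hjn : (j : Int) < data_length := by omega
    simp only [List.getElem_map, List.getElem_range]
    cases comparison_val with
    | none =>
      show (pvWrite data_length _ none "blue")[j]'hj₁ = _
      have hb : j < (pvWrite data_length (pvWrite data_length (pvWrite data_length
          (List.replicate data_length.toNat "red") (some low) "green") (some high) "green")
          (some smaller_val) "purple").length := by simp [pvWrite_length, hjN]
      rw [show (pvWrite data_length _ none "blue")[j]'hj₁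
            = (pvWrite data_length (pvWrite data_length (pvWrite data_length
                (List.replicate data_length.toNat "red") (some low) "green") (some high) "green")
                (some smaller_val) "purple")[j]'hb from rfl,
          pvWrite_getElem _ _ _ _ _ hjn (by simp [pvWrite_length, hjN]),
          pvWrite_getElem _ _ _ _ _ hjn (by simp [pvWrite_length, hjN]),
          pvWrite_getElem _ _ _ _ _ hjn (by simp [hjN]),
          List.getElem_replicate]
      unfold pvColorAt
      split_ifs <;> first | rfl | omega | simp_all
    | some v =>
      rw [pvWrite_getElem _ _ _ _ _ hjn (by simp [pvWrite_length, hjN]),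
          pvWrite_getElem _ _ _ _ _ hjn (by simp [pvWrite_length, hjN]),
          pvWrite_getElem _ _ _ _ _ hjn (by simp [pvWrite_length, hjN]),
          pvWrite_getElem _ _ _ _ _ hjn (by simp [hjN]),
          List.getElem_replicate]
      unfold pvColorAt
      split_ifs <;> first | rfl | omega | simp_all

-- ===== VERDICT (by name: the statement is the Claim_ definition above) =====
theorem qs_get_color_array_spec : Claim_equal_qs_get_color_array := by
  intro data_length low high smaller_val comparison_val _
  unfold Spec_qs_get_color_array
  rw [pvA_eq, pvB_eq]
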